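-- pv_equiv track=rewrite | github.com/melwyn95/project-euler | _048.py | trunc_add
-- ===== SOURCE A (Python) =====
-- def trunc_add(xys):
--     zs = []
--     n = max(map(len, xys))
--     carry = 0
--     bail = False
--     for i in range(n):
--         t = carry
--         for ys in xys:
--             if i < len(ys): t += ys[i]
--         if t >= 10: carry = t // 10
--         else: carry = 0
--         zs.append(t % 10)
--         if len(zs) == 10:
--             bail = True
--             break
--     if not bail:
--         if carry > 0: zs.append(carry)
--     return list(reversed(zs))
-- ===== SOURCE B (Python) =====
-- def _digits(cols, carry, k):
--     # big-endian digits, built back-to-front by recursion; stops after 10 digits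
--     if k == 10:
--         return []
--     if not cols:
--         return [carry] if carry > 0 else []
--     t = carry + cols[0]
--     return _digits(cols[1:], t // 10 if t >= 10 else 0, k + 1) + [t % 10]
--
-- def trunc_add(xys):
--     n = max(map(len, xys))
--     cols = [0] * n
--     for ys in xys:
--         for j, d in enumerate(ys):
--             cols[j] += d
--     return _digits(cols, 0, 0)
-- ===== Notes on version B (the rewrite author's own statement) =====
-- stated objective: alternative
-- what changed: A's single fused column-major loop with a bail flag, a zs accumulator and a final reverse is replaced by an addend-major column-sum pass followed by a recursive carry-propagation helper that builds the big-endian result back-to-front (digit appended after the recursive call), with no bail flag and no reversal; Pre_ excludes only the empty list, on which both raise ValueError.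
import Mathlib
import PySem

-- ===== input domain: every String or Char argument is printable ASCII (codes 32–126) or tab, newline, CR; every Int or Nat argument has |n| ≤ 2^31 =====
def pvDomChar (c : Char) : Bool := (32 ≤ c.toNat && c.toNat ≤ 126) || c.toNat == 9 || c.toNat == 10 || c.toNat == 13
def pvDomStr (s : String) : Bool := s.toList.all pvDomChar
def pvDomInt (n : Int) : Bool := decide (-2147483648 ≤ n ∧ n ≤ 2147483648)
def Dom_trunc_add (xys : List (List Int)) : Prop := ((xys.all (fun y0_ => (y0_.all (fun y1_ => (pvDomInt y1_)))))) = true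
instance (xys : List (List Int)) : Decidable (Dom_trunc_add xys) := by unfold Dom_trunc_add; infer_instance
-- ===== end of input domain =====

-- B replaces A's fused column-major loop (bail flag, zs accumulator, final reverse) by an
-- addend-major column-sum pass plus a recursive carry pass that builds the big-endian
-- result back-to-front; objective: alternative.

-- ===== PORT A =====
-- for i in range(n): t = carry; for ys in xys: …; carry/append/bail — fused loop with break
def loopA (xys : List (List Int)) : List Int → List Int → Int → List Int × Int × Bool
  | [], zs, carry => (zs, carry, false)
  | i :: rest, zs, carry =>
    let t := xys.foldl (fun t ys => if i < (ys.length : Int) then t + PySem.List.pyGetD ys i 0 else t) carry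
    let carry' := if 10 ≤ t then PySem.Int.floordiv t 10 else 0
    let zs' := zs ++ [PySem.Int.mod t 10]
    if zs'.length = 10 then (zs', carry', true) else loopA xys rest zs' carry'

def trunc_add (xys : List (List Int)) : List Int :=
  match PySem.List.max? (xys.map (fun ys => (ys.length : Int))) (fun x => x) with
  | none => []   -- max() of empty: ValueError, excluded by Pre_
  | some n =>
    let r := loopA xys (PySem.List.pyRange 0 n 1) [] 0
    let zs := if r.2.2 = false ∧ 0 < r.2.1 then r.1 ++ [r.2.1] else r.1
    zs.reverse

-- ===== PORT B =====
-- for j, d in enumerate(ys): cols[j] += d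
def addRow (col : List Int) (ys : List Int) : List Int :=
  (PySem.List.enumerate ys 0).foldl
    (fun c jd => PySem.List.pySetD c jd.1 (PySem.List.pyGetD c jd.1 0 + jd.2)) col

-- _digits: recursive carry propagation, digit appended after the recursive call
def digitsB (cols : List Int) (carry : Int) (k : Nat) : List Int :=
  if k = 10 then []
  else
    match cols with
    | [] => if 0 < carry then [carry] else []
    | t0 :: rest =>
      let t := carry + t0
      digitsB rest (if 10 ≤ t then PySem.Int.floordiv t 10 else 0) (k + 1) ++ [PySem.Int.mod t 10]

def trunc_add_alt (xys : List (List Int)) : List Int :=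
  match PySem.List.max? (xys.map (fun ys => (ys.length : Int))) (fun x => x) with
  | none => []   -- max() of empty: ValueError, excluded by Pre_
  | some n => digitsB (xys.foldl addRow (List.replicate n.toNat 0)) 0 0

-- ===== PRECONDITION & SPEC =====
-- Pre_ excludes only the empty outer list, on which A's max() raises ValueError (B raises too).
def Pre_trunc_add (xys : List (List Int)) : Prop := xys ≠ []
instance (xys : List (List Int)) : Decidable (Pre_trunc_add xys) := by unfold Pre_trunc_add; infer_instance
def pvWitness_trunc_add : List (List Int) := [[1, 2], [3]]

def Spec_trunc_add (xys : List (List Int)) (out : List Int) : Prop := out = trunc_add_alt xys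
instance (xys : List (List Int)) (out : List Int) : Decidable (Spec_trunc_add xys out) := by unfold Spec_trunc_add; infer_instance

-- ===== CLAIM (what is proved, stated in full; the proofs are below) =====
def Claim_equal_trunc_add : Prop := ∀ (xys : List (List Int)), Dom_trunc_add xys → Pre_trunc_add xys → Spec_trunc_add xys (trunc_add xys)

-- ===== LEMMAS AND PROOFS =====

-- generic form of A's carry loop, over a precomputed list of column sums
def loopAgen : List Int → List Int → Int → List Int × Int × Bool
  | [], zs, carry => (zs, carry, false)
  | t0 :: rest, zs, carry =>
    let t := carry + t0
    let carry' := if 10 ≤ t then PySem.Int.floordiv t 10 else 0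
    let zs' := zs ++ [PySem.Int.mod t 10]
    if zs'.length = 10 then (zs', carry', true) else loopAgen rest zs' carry'

-- the per-column sum A accumulates, started at 0
def colsum (xys : List (List Int)) (i : Int) : Int :=
  xys.foldl (fun t ys => if i < (ys.length : Int) then t + PySem.List.pyGetD ys i 0 else t) 0

lemma colFold_shift0 (xys : List (List Int)) (i : Int) (c : Int) :
    xys.foldl (fun t ys => if i < (ys.length : Int) then t + PySem.List.pyGetD ys i 0 else t) c
      = c + xys.foldl (fun t ys => if i < (ys.length : Int) then t + PySem.List.pyGetD ys i 0 else t) 0 := by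
  induction xys generalizing c with
  | nil => simp
  | cons ys xys ih =>
    simp only [List.foldl_cons]
    rw [ih (if i < ((ys.length : Int)) then c + PySem.List.pyGetD ys i 0 else c),
        ih (if i < ((ys.length : Int)) then (0 : Int) + PySem.List.pyGetD ys i 0 else 0)]
    split <;> ring

lemma colFold_shift (xys : List (List Int)) (i : Int) (c : Int) :
    xys.foldl (fun t ys => if i < (ys.length : Int) then t + PySem.List.pyGetD ys i 0 else t) c
      = c + colsum xys i :=
  colFold_shift0 xys i c

lemma loopA_eq_loopAgen (xys : List (List Int)) (is : List Int) (zs : List Int) (c : Int) :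
    loopA xys is zs c = loopAgen (is.map (colsum xys)) zs c := by
  induction is generalizing zs c with
  | nil => simp [loopA, loopAgen]
  | cons i rest ih =>
    simp only [loopA, loopAgen, List.map_cons, colFold_shift]
    split
    · rfl
    · exact ih _ _

-- A's finish step on loopAgen's result equals digitsB, digit list built back-to-front
lemma finish_loopAgen_eq_digitsB (cols : List Int) : ∀ (zs : List Int) (c : Int),
    zs.length < 10 →
    (let r := loopAgen cols zs c
     (if r.2.2 = false ∧ 0 < r.2.1 then r.1 ++ [r.2.1] else r.1).reverse)
      = digitsB cols c zs.length ++ zs.reverse := by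
  induction cols with
  | nil =>
    intro zs c h
    simp only [loopAgen]
    rw [digitsB, if_neg (by omega : ¬ zs.length = 10)]
    by_cases hc : 0 < c
    · simp [hc]
    · simp [hc]
  | cons t0 rest ih =>
    intro zs c h
    simp only [loopAgen]
    rw [digitsB, if_neg (by omega : ¬ zs.length = 10)]
    simp only
    by_cases hlen : (zs ++ [PySem.Int.mod (c + t0) 10]).length = 10
    · rw [if_pos hlen]
      have h10 : zs.length + 1 = 10 := by simpa using hlen
      have hd : digitsB rest (if 10 ≤ c + t0 then PySem.Int.floordiv (c + t0) 10 else 0) (zs.length + 1) = [] := by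
        rw [digitsB.eq_def, if_pos h10]
      rw [hd]
      simp
    · rw [if_neg hlen]
      have hlt : (zs ++ [PySem.Int.mod (c + t0) 10]).length < 10 := by
        simp only [List.length_append, List.length_cons, List.length_nil] at *
        omega
      have := ih (zs ++ [PySem.Int.mod (c + t0) 10]) (if 10 ≤ c + t0 then PySem.Int.floordiv (c + t0) 10 else 0) hlt
      simp only [List.length_append, List.length_cons, List.length_nil, List.reverse_append,
        List.reverse_cons, List.reverse_nil] at this ⊢
      rw [this]
      simp

lemma rowAux (ys : List Int) : ∀ (s : Nat) (col : List Int), s + ys.length ≤ col.length →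
    ((PySem.List.enumerate ys (s : Int)).foldl
        (fun c jd => PySem.List.pySetD c jd.1 (PySem.List.pyGetD c jd.1 0 + jd.2)) col).length
      = col.length ∧
    ∀ j : Nat, ((PySem.List.enumerate ys (s : Int)).foldl
        (fun c jd => PySem.List.pySetD c jd.1 (PySem.List.pyGetD c jd.1 0 + jd.2)) col).getD j 0
      = col.getD j 0 + (if s ≤ j ∧ j < s + ys.length then ys.getD (j - s) 0 else 0) := by
  induction ys with
  | nil => intro s col h; simp [PySem.List.enumerate_nil]
  | cons d ys ih =>
    intro s col h
    rw [PySem.List.enumerate_cons]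
    simp only [List.foldl_cons]
    have hset : PySem.List.pySetD col (s : Int) (PySem.List.pyGetD col (s : Int) 0 + d)
        = col.set s (col.getD s 0 + d) := by
      simp [PySem.List.pySetD_natCast, PySem.List.pyGetD_natCast]
    have hcast : ((s : Int) + 1) = ((s + 1 : Nat) : Int) := by push_cast; ring
    have hlen : (col.set s (col.getD s 0 + d)).length = col.length := by simp
    rw [hset, hcast]
    obtain ⟨ihlen, ihget⟩ := ih (s + 1) (col.set s (col.getD s 0 + d))
      (by rw [hlen]; simp only [List.length_cons] at h; omega)
    refine ⟨by rw [ihlen, hlen], ?_⟩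
    intro j
    rw [ihget j]
    have hs : s < col.length := by simp only [List.length_cons] at h; omega
    have hget : (col.set s (col.getD s 0 + d)).getD j 0
        = if j = s then col.getD s 0 + d else col.getD j 0 := by
      by_cases hj : j = s
      · subst hj; simp [List.getD, hs]
      · simp only [List.getD, List.getElem?_set]
        simp [Ne.symm hj]
        exact fun h => absurd h hj
    rw [hget]
    by_cases hj : j = s
    · subst hj
      have h1 : ¬ (j + 1 ≤ j ∧ j < j + 1 + ys.length) := by omega
      have h2 : j ≤ j ∧ j < j + (d :: ys).length := by simp only [List.length_cons]; omega
      rw [if_pos rfl, if_neg h1, if_pos h2, Nat.sub_self]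
      simp
    · rw [if_neg hj]
      by_cases hr : s + 1 ≤ j ∧ j < s + 1 + ys.length
      · have h2 : s ≤ j ∧ j < s + (d :: ys).length := by simp only [List.length_cons]; omega
        rw [if_pos hr, if_pos h2, show j - s = (j - (s + 1)) + 1 from by omega]
        simp
      · have h2 : ¬ (s ≤ j ∧ j < s + (d :: ys).length) := by simp only [List.length_cons]; omega
        rw [if_neg hr, if_neg h2]

lemma buildCol (xys : List (List Int)) : ∀ (acc : List Int),
    (∀ ys ∈ xys, ys.length ≤ acc.length) →
    (xys.foldl addRow acc).length = acc.length ∧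
    ∀ j : Nat, (xys.foldl addRow acc).getD j 0 = acc.getD j 0 + colsum xys (j : Int) := by
  induction xys with
  | nil => intro acc _; simp [colsum]
  | cons ys xys ih =>
    intro acc hle
    simp only [List.foldl_cons]
    obtain ⟨rlen, rget⟩ := rowAux ys 0 acc (by simpa using hle ys (by simp))
    obtain ⟨ilen, iget⟩ := ih (addRow acc ys) (by
      intro zs hz; rw [show (addRow acc ys).length = acc.length from rlen]
      exact hle zs (by simp [hz]))
    refine ⟨by rw [ilen]; exact rlen, ?_⟩
    intro j
    rw [iget j]
    have := rget j
    simp only [Nat.zero_add, Nat.zero_le, true_and, Nat.sub_zero] at this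
    rw [show addRow acc ys = (PySem.List.enumerate ys ((0 : Nat) : Int)).foldl
        (fun c jd => PySem.List.pySetD c jd.1 (PySem.List.pyGetD c jd.1 0 + jd.2)) acc from by
      simp [addRow]]
    rw [this]
    have hcs : colsum (ys :: xys) (j : Int)
        = (if (j : Int) < (ys.length : Int) then (0 : Int) + PySem.List.pyGetD ys (j : Int) 0 else 0)
            + colsum xys (j : Int) := by
      simp only [colsum, List.foldl_cons]
      exact colFold_shift0 xys (j : Int) _
    rw [hcs, PySem.List.pyGetD_natCast]
    simp only [Nat.cast_lt, zero_add]
    ring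

lemma col_eq_map (xys : List (List Int)) (n : Int)
    (hmax : ∀ ys ∈ xys, (ys.length : Int) ≤ n) :
    xys.foldl addRow (List.replicate n.toNat 0) = (PySem.List.pyRange 0 n 1).map (colsum xys) := by
  have hle : ∀ ys ∈ xys, ys.length ≤ (List.replicate n.toNat (0 : Int)).length := by
    intro ys hy
    have := hmax ys hy
    simp only [List.length_replicate]
    omega
  obtain ⟨hlen, hget⟩ := buildCol xys (List.replicate n.toNat 0) hle
  apply List.ext_getElem
  · rw [hlen]
    simp [PySem.List.length_pyRange_one]
  · intro j h1 h2
    have hj : j < n.toNat := by rw [hlen] at h1; simpa using h1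
    have hjr : j < (PySem.List.pyRange 0 n 1).length := by
      simpa [PySem.List.length_pyRange_one] using hj
    rw [List.getElem_map]
    rw [PySem.List.getElem_pyRange_one]
    have hL : (xys.foldl addRow (List.replicate n.toNat 0)).getD j 0
        = (xys.foldl addRow (List.replicate n.toNat 0))[j] := by
      simp [List.getD, List.getElem?_eq_getElem h1]
    rw [← hL, hget j]
    simp [hj]

-- ===== VERDICT (by name: the statement is the Claim_ definition above) =====
theorem trunc_add_spec : Claim_equal_trunc_add := by
  intro xys _ _
  unfold Spec_trunc_add trunc_add trunc_add_alt
  cases h : PySem.List.max? (xys.map (fun ys => (ys.length : Int))) (fun x => x) with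
  | none => rfl
  | some n =>
    have hmax : ∀ ys ∈ xys, (ys.length : Int) ≤ n := by
      intro ys hy
      have := PySem.List.max?_isMax h ((ys.length : Int)) (List.mem_map_of_mem hy)
      simpa using this
    simp only
    rw [loopA_eq_loopAgen, col_eq_map xys n hmax]
    have := finish_loopAgen_eq_digitsB ((PySem.List.pyRange 0 n 1).map (colsum xys)) [] 0 (by simp)
    simpa using this
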